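-- pv_equiv track=rewrite | github.com/tyrocca/dailyprogrammer | intermediate/challenge_245.py | translate_from_alien
-- ===== SOURCE A (Python) =====
-- def alien_to_english(key_string):
--     """
--     function that takes in the key string and makes a lookup dictionary
--     for the string
--     """
--     letter = None
--     letter_to_dict = {}
--     for i, item in enumerate(key_string.split(" ")):
--         if i % 2 == 0:
--             letter = item
--         else:
--             letter_to_dict[item] = letter
--     return letter_to_dict
--
-- def translate_from_alien(key_string, alien_sentence):
--     """
--     function that takes in the key string and the sentence and translates it
--     """
--     converter_dict = alien_to_english(key_string)
--
--     decoded = ""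
--     letter = ""
--     for l in alien_sentence:
--         if l == "G" or l == "g":
--             letter += l
--             if letter in converter_dict:
--                 # if it is found convert it
--                 decoded += converter_dict[letter]
--                 letter = ""
--         else:
--             decoded += l
--     return decoded
-- ===== SOURCE B (Python) =====
-- # Trie-based decoder: alien codes are stored in a binary g/G trie and the
-- # sentence is decoded with a single trie pointer instead of accumulating a
-- # string and probing a flat dict on every g/G character.
--
-- def _insert(node, code, letter):
--     # node layout: [terminal_letter, g_child, G_child]
--     for ch in code:
--         if ch == 'g':
--             if node[1] is None:
--                 node[1] = [None, None, None]
--             node = node[1]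
--         elif ch == 'G':
--             if node[2] is None:
--                 node[2] = [None, None, None]
--             node = node[2]
--         else:
--             # a code containing any other character can never be matched
--             return
--     node[0] = letter
--
-- def translate_from_alien(key_string, alien_sentence):
--     root = [None, None, None]
--     letter = None
--     for i, item in enumerate(key_string.split(" ")):
--         if i % 2 == 0:
--             letter = item
--         else:
--             _insert(root, item, letter)
--
--     out = []
--     node = root  # None means: current g/G run can never complete a code
--     for ch in alien_sentence:
--         if ch == 'g' or ch == 'G':
--             if node is not None:
--                 node = node[1] if ch == 'g' else node[2]
--                 if node is not None and node[0] is not None: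
--                     out.append(node[0])
--                     node = root
--         else:
--             out.append(ch)
--     return ''.join(out)
-- ===== Notes on version B (the rewrite author's own statement) =====
-- stated objective: alternative
-- what changed: B stores the alien codes in a binary g/G trie and decodes with a single trie pointer (descend on each g/G character, emit at a terminal node, go dead once the run cannot complete a code), instead of A's flat code-to-letter dict probed with a growing accumulator string on every g/G character.
import Mathlib
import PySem

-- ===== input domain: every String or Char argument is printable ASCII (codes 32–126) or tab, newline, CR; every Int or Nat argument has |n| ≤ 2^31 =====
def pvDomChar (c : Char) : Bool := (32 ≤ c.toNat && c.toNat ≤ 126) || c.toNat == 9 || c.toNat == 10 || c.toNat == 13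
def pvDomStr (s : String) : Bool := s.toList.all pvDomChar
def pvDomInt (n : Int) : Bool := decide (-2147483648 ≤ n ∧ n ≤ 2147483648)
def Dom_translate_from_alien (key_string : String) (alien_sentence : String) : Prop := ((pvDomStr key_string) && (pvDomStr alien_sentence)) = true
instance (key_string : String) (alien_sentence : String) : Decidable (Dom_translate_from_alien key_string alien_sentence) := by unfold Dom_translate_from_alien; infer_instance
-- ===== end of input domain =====

-- B replaces A's flat code→letter dict and growing match string by a binary g/G trie
-- walked with a single pointer (objective: alternative decomposition, same cost).

-- ===== PORT A =====
-- alien_to_english: fold over enumerate(key_string.split(" ")); state = (letter, dict).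
-- letter.getD [] is unreachable: index 0 is even, so letter is set before the first odd index.
def pyA_build_step (st : Option (List Char) × PySem.Dict (List Char) (List Char))
    (p : Int × List Char) : Option (List Char) × PySem.Dict (List Char) (List Char) :=
  if PySem.Int.mod p.1 2 = 0 then (some p.2, st.2)
  else (st.1, st.2.insert p.2 (st.1.getD []))

def alien_to_english (key_string : String) : PySem.Dict (List Char) (List Char) :=
  ((PySem.List.enumerate (PySem.Chars.splitOn key_string.toList [' '])).foldl
    pyA_build_step (none, PySem.Dict.empty)).2

-- the decode loop body: state = (decoded, letter)
def pyA_step (d : PySem.Dict (List Char) (List Char))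
    (st : List Char × List Char) (l : Char) : List Char × List Char :=
  if l = 'G' ∨ l = 'g' then
    let letter' := st.2 ++ [l]
    match d.get? letter' with
    | some v => (st.1 ++ v, [])
    | none => (st.1, letter')
  else (st.1 ++ [l], st.2)

def translate_from_alien (key_string : String) (alien_sentence : String) : String :=
  let d := alien_to_english key_string
  String.ofList (alien_sentence.toList.foldl (pyA_step d) ([], [])).1

-- ===== PORT B =====
-- binary trie node [terminal, g_child, G_child]; `missing` is Python's None child
inductive GTrie where
  | missing : GTrie
  | node : Option (List Char) → GTrie → GTrie → GTrie
deriving DecidableEq, Repr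

-- "create the child if None" view of a node
def GTrie.parts : GTrie → Option (List Char) × GTrie × GTrie
  | .missing => (none, .missing, .missing)
  | .node t l r => (t, l, r)

-- _insert: walk the code, creating children; stop on a non-g/G character
def trieInsert : GTrie → List Char → List Char → GTrie
  | t, [], letter =>
    let (_, l, r) := t.parts
    .node (some letter) l r
  | t, c :: cs, letter =>
    let (term, l, r) := t.parts
    if c = 'g' then .node term (trieInsert l cs letter) r
    else if c = 'G' then .node term l (trieInsert r cs letter)
    else .node term l r

def pyB_build_step (st : Option (List Char) × GTrie)
    (p : Int × List Char) : Option (List Char) × GTrie :=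
  if PySem.Int.mod p.1 2 = 0 then (some p.2, st.2)
  else (st.1, trieInsert st.2 p.2 (st.1.getD []))

def buildTrie (key_string : String) : GTrie :=
  ((PySem.List.enumerate (PySem.Chars.splitOn key_string.toList [' '])).foldl
    pyB_build_step (none, GTrie.node none .missing .missing)).2

-- decode loop body: state = (out, pointer); pointer .missing = Python's node is None
def pyB_step (root : GTrie) (st : List Char × GTrie) (ch : Char) : List Char × GTrie :=
  if ch = 'g' ∨ ch = 'G' then
    match st.2 with
    | .missing => (st.1, .missing)
    | .node _ l r =>
      match (if ch = 'g' then l else r) with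
      | .node (some v) _ _ => (st.1 ++ v, root)
      | c => (st.1, c)
  else (st.1 ++ [ch], st.2)

def translate_from_alien_alt (key_string : String) (alien_sentence : String) : String :=
  let root := buildTrie key_string
  String.ofList (alien_sentence.toList.foldl (pyB_step root) ([], root)).1

-- ===== PRECONDITION & SPEC =====
def Spec_translate_from_alien (key_string : String) (alien_sentence : String) (out : String) : Prop := out = translate_from_alien_alt key_string alien_sentence
instance (key_string : String) (alien_sentence : String) (out : String) : Decidable (Spec_translate_from_alien key_string alien_sentence out) := by unfold Spec_translate_from_alien; infer_instance

-- ===== CLAIM (what is proved, stated in full; the proofs are below) =====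
def Claim_equal_translate_from_alien : Prop := ∀ (key_string : String) (alien_sentence : String), Dom_translate_from_alien key_string alien_sentence → Spec_translate_from_alien key_string alien_sentence (translate_from_alien key_string alien_sentence)

-- ===== LEMMAS AND PROOFS =====

-- proof-side view of the trie: follow a g/G path, read the terminal mark
def descend : GTrie → List Char → GTrie
  | t, [] => t
  | .missing, _ :: _ => .missing
  | .node _ l r, c :: cs => descend (if c = 'g' then l else r) cs

def gterm : GTrie → Option (List Char)
  | .missing => none
  | .node t _ _ => t

def gOnly (s : List Char) : Prop := ∀ c ∈ s, c = 'g' ∨ c = 'G'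

theorem gOnly_nil : gOnly [] := by intro c hc; cases hc

theorem gOnly_append (s : List Char) (c : Char) (hs : gOnly s) (hc : c = 'g' ∨ c = 'G') :
    gOnly (s ++ [c]) := by
  intro d hd
  rcases List.mem_append.1 hd with h | h
  · exact hs d h
  · simp at h; subst h; exact hc

@[simp] theorem gterm_missing : gterm .missing = none := rfl
@[simp] theorem gterm_node (a : Option (List Char)) (l r : GTrie) :
    gterm (.node a l r) = a := rfl
@[simp] theorem descend_nil (t : GTrie) : descend t [] = t := by cases t <;> rfl
@[simp] theorem descend_missing (s : List Char) : descend .missing s = .missing := by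
  cases s <;> rfl
@[simp] theorem descend_cons (a : Option (List Char)) (l r : GTrie) (c : Char)
    (cs : List Char) :
    descend (.node a l r) (c :: cs) = descend (if c = 'g' then l else r) cs := rfl

theorem descend_append (t : GTrie) (s : List Char) (c : Char) :
    descend t (s ++ [c]) = descend (descend t s) [c] := by
  induction s generalizing t with
  | nil => simp
  | cons d s ih =>
    cases t with
    | missing => simp
    | node a l r => simp only [List.cons_append, descend_cons]; exact ih _

-- the key lemma: inserting a code changes exactly the terminal at that code
theorem gterm_descend_insert (cs : List Char) (t : GTrie) (v : List Char) (s : List Char)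
    (hs : gOnly s) :
    gterm (descend (trieInsert t cs v) s) =
      if s = cs then some v else gterm (descend t s) := by
  induction cs generalizing t s with
  | nil =>
    cases s with
    | nil => cases t <;> simp [trieInsert, GTrie.parts]
    | cons d s' =>
      cases t <;> simp [trieInsert, GTrie.parts]
  | cons c cs' ih =>
    have hs' : ∀ x ∈ s.tail, x = 'g' ∨ x = 'G' := by
      intro x hx; exact hs x (List.mem_of_mem_tail hx)
    by_cases hg : c = 'g'
    · subst hg
      cases s with
      | nil => cases t <;> simp [trieInsert, GTrie.parts]
      | cons d s' =>
        have hd := hs d List.mem_cons_self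
        have hgo : gOnly s' := hs'
        by_cases hdg : d = 'g'
        · subst hdg
          cases t with
          | missing => simp [trieInsert, GTrie.parts, ih GTrie.missing s' hgo]
          | node a l r => simp [trieInsert, GTrie.parts, ih l s' hgo]
        · have hdG : d = 'G' := hd.resolve_left hdg
          subst hdG
          cases t <;>
            simp [trieInsert, GTrie.parts, (by decide : ¬ ('G' : Char) = 'g')]
    · by_cases hG : c = 'G'
      · subst hG
        cases s with
        | nil => cases t <;> simp [trieInsert, GTrie.parts, hg]
        | cons d s' =>
          have hd := hs d List.mem_cons_self
          have hgo : gOnly s' := hs'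
          by_cases hdg : d = 'g'
          · subst hdg
            cases t <;>
              simp [trieInsert, GTrie.parts, hg, (by decide : ¬ ('g' : Char) = 'G')]
          · have hdG : d = 'G' := hd.resolve_left hdg
            subst hdG
            cases t with
            | missing => simp [trieInsert, GTrie.parts, hg, ih GTrie.missing s' hgo]
            | node a l r => simp [trieInsert, GTrie.parts, hg, ih r s' hgo]
      · -- dead code character: s ≠ c :: cs' since s is g/G only
        have hne : s ≠ c :: cs' := by
          intro h; subst h
          exact absurd (hs c List.mem_cons_self) (by simp [hg, hG])
        cases s with
        | nil => cases t <;> simp [trieInsert, GTrie.parts, hg, hG]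
        | cons d s' =>
          cases t <;>
            simp only [trieInsert, GTrie.parts, hg, hG, if_false, if_neg hne,
              descend_cons] <;> split <;> simp

-- correspondence between A's dict and B's trie
def Corr (d : PySem.Dict (List Char) (List Char)) (t : GTrie) : Prop :=
  ∀ s : List Char, gOnly s → gterm (descend t s) = d.get? s

theorem corr_init : Corr PySem.Dict.empty (GTrie.node none .missing .missing) := by
  intro s hs
  cases s with
  | nil => rfl
  | cons d s' => simp [descend, descend_missing, gterm, PySem.Dict.empty, PySem.Dict.get?]

theorem corr_insert (d : PySem.Dict (List Char) (List Char)) (t : GTrie)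
    (code v : List Char) (h : Corr d t) :
    Corr (d.insert code v) (trieInsert t code v) := by
  intro s hs
  rw [gterm_descend_insert code t v s hs, PySem.Dict.get?_insert, h s hs]

theorem build_corr (ps : List (Int × List Char)) (letter : Option (List Char))
    (d : PySem.Dict (List Char) (List Char)) (t : GTrie) (h : Corr d t) :
    (ps.foldl pyA_build_step (letter, d)).1 = (ps.foldl pyB_build_step (letter, t)).1 ∧
      Corr (ps.foldl pyA_build_step (letter, d)).2 (ps.foldl pyB_build_step (letter, t)).2 := by
  induction ps generalizing letter d t with
  | nil => exact ⟨rfl, h⟩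
  | cons p ps ih =>
    simp only [List.foldl_cons, pyA_build_step, pyB_build_step]
    by_cases hp : PySem.Int.mod p.1 2 = 0
    · simp only [hp, if_pos]; exact ih _ _ _ h
    · simp only [hp, if_neg, not_false_iff]
      exact ih _ _ _ (corr_insert d t p.2 (letter.getD []) h)

theorem buildTrie_corr (ks : String) : Corr (alien_to_english ks) (buildTrie ks) :=
  (build_corr _ none PySem.Dict.empty _ corr_init).2

-- decode loops stay in lockstep: B's pointer is `descend root letter`
theorem decode_eq (root : GTrie) (d : PySem.Dict (List Char) (List Char))
    (H : Corr d root) (chars : List Char) (out letter : List Char) (hg : gOnly letter) :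
    (chars.foldl (pyA_step d) (out, letter)).1 =
      (chars.foldl (pyB_step root) (out, descend root letter)).1 := by
  induction chars generalizing out letter with
  | nil => rfl
  | cons ch chars ih =>
    simp only [List.foldl_cons]
    by_cases hc : ch = 'G' ∨ ch = 'g'
    · have hc' : ch = 'g' ∨ ch = 'G' := hc.symm
      have hlet : gOnly (letter ++ [ch]) := gOnly_append letter ch hg hc'
      have hkey := H _ hlet
      rw [descend_append] at hkey
      cases hp : descend root letter with
      | missing =>
        rw [hp] at hkey; rw [descend_missing, gterm_missing] at hkey
        have hA : pyA_step d (out, letter) ch = (out, letter ++ [ch]) := by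
          simp [pyA_step, hc, ← hkey]
        have hB : pyB_step root (out, GTrie.missing) ch = (out, GTrie.missing) := by
          simp [pyB_step, hc']
        have h2 : descend root (letter ++ [ch]) = .missing := by
          rw [descend_append, hp, descend_missing]
        rw [hA, hB]
        have := ih out (letter ++ [ch]) hlet
        rw [h2] at this
        exact this
      | node a l r =>
        have hd2 : descend (descend root letter) [ch] = (if ch = 'g' then l else r) := by
          rw [hp]; simp
        rw [hd2] at hkey
        cases hchild : (if ch = 'g' then l else r) with
        | missing =>
          rw [hchild, gterm_missing] at hkey
          have hA : pyA_step d (out, letter) ch = (out, letter ++ [ch]) := by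
            simp [pyA_step, hc, ← hkey]
          have hB : pyB_step root (out, GTrie.node a l r) ch = (out, GTrie.missing) := by
            simp [pyB_step, hc', hchild]
          have h2 : descend root (letter ++ [ch]) = .missing := by
            rw [descend_append, hd2, hchild]
          rw [hA, hB]
          have := ih out (letter ++ [ch]) hlet
          rw [h2] at this
          exact this
        | node b l2 r2 =>
          rw [hchild, gterm_node] at hkey
          cases b with
          | none =>
            have hA : pyA_step d (out, letter) ch = (out, letter ++ [ch]) := by
              simp [pyA_step, hc, ← hkey]
            have hB : pyB_step root (out, GTrie.node a l r) ch =
                (out, GTrie.node none l2 r2) := by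
              simp [pyB_step, hc', hchild]
            have h2 : descend root (letter ++ [ch]) = GTrie.node none l2 r2 := by
              rw [descend_append, hd2, hchild]
            rw [hA, hB]
            have := ih out (letter ++ [ch]) hlet
            rw [h2] at this
            exact this
          | some v =>
            have hA : pyA_step d (out, letter) ch = (out ++ v, []) := by
              simp [pyA_step, hc, ← hkey]
            have hB : pyB_step root (out, GTrie.node a l r) ch = (out ++ v, root) := by
              simp [pyB_step, hc', hchild]
            rw [hA, hB]
            have := ih (out ++ v) [] gOnly_nil
            rw [descend_nil] at this
            exact this
    · have hA : pyA_step d (out, letter) ch = (out ++ [ch], letter) := by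
        simp [pyA_step, hc]
      have hB : pyB_step root (out, descend root letter) ch =
          (out ++ [ch], descend root letter) := by
        have h1 : ¬ (ch = 'g' ∨ ch = 'G') := by tauto
        simp [pyB_step, h1]
      rw [hA, hB]; exact ih (out ++ [ch]) letter hg

-- ===== VERDICT (by name: the statement is the Claim_ definition above) =====
theorem translate_from_alien_spec : Claim_equal_translate_from_alien := by
  intro ks sent _
  unfold Spec_translate_from_alien translate_from_alien translate_from_alien_alt
  have h := decode_eq (buildTrie ks) (alien_to_english ks) (buildTrie_corr ks)
    sent.toList [] [] gOnly_nil
  rw [show descend (buildTrie ks) [] = buildTrie ks from rfl] at h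
  simp only []
  rw [h]
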